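-- pv_equiv track=rewrite | github.com/baedonguri/JungleAlgorithm | 알고리즘스터디/week03/04_문자열압축.py | solution
-- ===== SOURCE A (Python) =====
-- def solution(string):
--     answer = len(string)
--     result = []
--     if answer == 1: return 1
--
--     for i in range(1, len(string)+1):
--         b = ''
--         cnt = 1
--         words = string[:i]
--
--         for j in range(i, len(string)+i, i):
--             if words == string[j:j+i]:
--                 cnt += 1
--             else:
--                 if cnt != 1:
--                     b += (str(cnt)+words)
--                 else:
--                     b += words
--                 cnt = 1
--                 words = string[j:j+i]
--         answer = min(answer, len(b))
--
--     return answer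
-- ===== SOURCE B (Python) =====
-- def solution(string):
--     # For each unit i: build a backward "shift-match streak" array
--     # (streak[k] = number of consecutive positions from k where the string
--     # matches itself shifted by i), so whether a block repeats the previous
--     # one is a single O(1) streak lookup; the compressed length is then
--     # accumulated numerically from the run counters -- no substring is ever
--     # built or compared.  Units above len//2 can never compress (baseline n).
--     n = len(string)
--     best = n
--     for i in range(1, n // 2 + 1):
--         streak = [0] * (n + 1)
--         for k in range(n - 1, i - 1, -1):
--             streak[k] = streak[k + 1] + 1 if string[k] == string[k - i] else 0
--         total = 0
--         run = 1
--         start = 0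
--         for pos in range(i, n, i):
--             if pos + i <= n and streak[pos] >= i:
--                 run += 1
--             else:
--                 total += i + (len(str(run)) if run > 1 else 0)
--                 run = 1
--                 start = pos
--         total += (n - start if run == 1 else i) + (len(str(run)) if run > 1 else 0)
--         best = min(best, total)
--     return best
-- ===== Notes on version B (the rewrite author's own statement) =====
-- stated objective: alternative
-- what changed: B never builds or compares substrings: for each unit it precomputes a backward shift-match streak array so that testing whether a block repeats the previous block is a single streak lookup, and it accumulates the compressed length numerically from run counters, skipping units above len//2 since those can never compress; A builds every compressed string by slicing and concatenation and takes its length.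
import Mathlib
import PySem

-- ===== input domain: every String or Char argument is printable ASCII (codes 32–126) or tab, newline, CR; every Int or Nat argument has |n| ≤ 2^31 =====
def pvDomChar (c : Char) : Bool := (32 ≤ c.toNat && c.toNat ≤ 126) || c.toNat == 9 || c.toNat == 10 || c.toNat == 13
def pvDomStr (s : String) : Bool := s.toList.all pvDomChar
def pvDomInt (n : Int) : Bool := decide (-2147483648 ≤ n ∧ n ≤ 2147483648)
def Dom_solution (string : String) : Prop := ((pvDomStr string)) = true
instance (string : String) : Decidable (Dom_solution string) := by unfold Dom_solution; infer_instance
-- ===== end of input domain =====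

-- B replaces A's substring slicing/comparison/concatenation by a per-unit backward
-- shift-match streak recursion (block repetition becomes one streak test) and a purely
-- numeric accumulation of the compressed length; alternative algorithm, not faster.

-- ===== PORT A =====
-- one step of A's inner loop: compare 'words' with the next slice x, else flush into 'b'
def stepL (st : List Char × Int × List Char) (x : List Char) : List Char × Int × List Char :=
  if st.2.2 = x then (st.1, st.2.1 + 1, st.2.2)
  else ((if st.2.1 ≠ 1 then st.1 ++ PySem.Int.toChars st.2.1 ++ st.2.2 else st.1 ++ st.2.2), 1, x)

def stepA (s : List Char) (i : Int) (st : List Char × Int × List Char) (j : Int) :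
    List Char × Int × List Char :=
  stepL st (PySem.List.slice s (some j) (some (j + i)))

def solution (string : String) : Int :=
  let s := string.toList
  let answer : Int := PySem.List.len s
  if answer = 1 then 1
  else
    (PySem.List.pyRange 1 (PySem.List.len s + 1) 1).foldl
      (fun answer i =>
        let r := (PySem.List.pyRange i (PySem.List.len s + i) i).foldl (stepA s i)
                   ([], 1, PySem.List.slice s none (some i))
        min answer (PySem.List.len r.1))
      answer

-- ===== PORT B =====
-- streak[k] = streak[k+1] + 1 if string[k] == string[k-i] else 0, filled from the right;
-- the Python list is memoization of exactly this linear recursion (indices are in range,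
-- so pyGetD's default is never used).
def streakB (s : List Char) (i : Int) (k : Int) : Int :=
  if h : i ≤ k ∧ k < (s.length : Int) then
    (if PySem.List.pyGetD s k ' ' = PySem.List.pyGetD s (k - i) ' ' then
      streakB s i (k + 1) + 1 else 0)
  else 0
  termination_by ((s.length : Int) - k).toNat
  decreasing_by omega

-- one step of B's pos-loop on the state (total, run, start)
def stepB (s : List Char) (i : Int) (st : Int × Int × Int) (pos : Int) : Int × Int × Int :=
  if pos + i ≤ (s.length : Int) ∧ i ≤ streakB s i pos then (st.1, st.2.1 + 1, st.2.2)
  else (st.1 + i + (if 1 < st.2.1 then ((PySem.Int.toChars st.2.1).length : Int) else 0), 1, pos)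

def solution_alt (string : String) : Int :=
  let s := string.toList
  let n : Int := PySem.List.len s
  (PySem.List.pyRange 1 (PySem.Int.floordiv n 2 + 1) 1).foldl
    (fun best i =>
      let r := (PySem.List.pyRange i n i).foldl (stepB s i) (0, 1, 0)
      min best (r.1 + (if r.2.1 = 1 then n - r.2.2 else i)
        + (if 1 < r.2.1 then ((PySem.Int.toChars r.2.1).length : Int) else 0)))
    n

-- ===== PRECONDITION & SPEC =====
def Spec_solution (string : String) (out : Int) : Prop := out = solution_alt string
instance (string : String) (out : Int) : Decidable (Spec_solution string out) := by unfold Spec_solution; infer_instance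

-- ===== CLAIM (what is proved, stated in full; the proofs are below) =====
def Claim_equal_solution : Prop := ∀ (string : String), Dom_solution string → Spec_solution string (solution string)

-- ===== LEMMAS AND PROOFS =====

-- proof-side common description: the chunk list and its run-length-encoded size
def chunksOf (s : List Char) (i : Int) : List (List Char) :=
  (PySem.List.pyRange 0 (PySem.List.len s) i).map
    (fun k => PySem.List.slice s (some k) (some (k + i)))

def chunksFrom (s : List Char) (i p : Int) : List (List Char) :=
  (PySem.List.pyRange p (s.length : Int) i).map
    (fun q => PySem.List.slice s (some q) (some (q + i)))

def runSum : List (List Char) → Int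
  | [] => 0
  | c :: rest =>
      let run : Int := 1 + ((rest.takeWhile (· == c)).length : Int)
      PySem.List.len c
        + (if 1 < run then (PySem.List.len (PySem.Int.toChars run)) else 0)
        + runSum (rest.dropWhile (· == c))
  termination_by l => l.length
  decreasing_by
    simpa using Nat.lt_succ_of_le (List.length_dropWhile_le _ _)

-- step-i range induction forms
theorem pyRangeStep_nil (a b i : Int) (hi : 0 < i) (h : b ≤ a) :
    PySem.List.pyRange a b i = [] := by
  rw [PySem.List.pyRange_of_pos a b hi, if_neg (by omega)]
  simp

theorem pyRangeStep_cons (a b i : Int) (hi : 0 < i) (h : a < b) :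
    PySem.List.pyRange a b i = a :: PySem.List.pyRange (a + i) b i := by
  rw [PySem.List.pyRange_of_pos a b hi, PySem.List.pyRange_of_pos (a + i) b hi, if_pos h]
  by_cases h2 : a + i < b
  · rw [if_pos h2]
    have hc : ((b - a + i - 1) / i).toNat = ((b - (a + i) + i - 1) / i).toNat + 1 := by
      have he : b - a + i - 1 = (b - (a + i) + i - 1) + 1 * i := by ring
      rw [he, Int.add_mul_ediv_right _ _ (by omega)]
      have h1 : 0 ≤ (b - (a + i) + i - 1) / i := Int.ediv_nonneg (by omega) (by omega)
      omega
    rw [hc, List.range_succ_eq_map]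
    simp only [List.map_cons, List.map_map, Nat.cast_zero, mul_zero, add_zero]
    congr 1
    apply List.map_congr_left
    intro k _
    simp only [Function.comp_apply]
    push_cast
    ring
  · rw [if_neg h2]
    have hq : (b - a + i - 1) / i = 1 := by
      have hiff := PySem.Int.floordiv_eq_iff_of_pos (a := b - a + i - 1) (b := i) (q := 1)
        (by omega)
      rw [PySem.Int.floordiv_eq_ediv_of_pos (by omega)] at hiff
      rw [hiff]
      omega
    rw [hq]
    simp

theorem streakB_nonneg (s : List Char) (i k : Int) : 0 ≤ streakB s i k := by
  fun_induction streakB s i k <;> omega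

theorem streak_ge_iff (s : List Char) (i : Int) :
    ∀ (d : Nat) (k : Int), i ≤ k →
      (((d : Int) ≤ streakB s i k) ↔
        ∀ u : Nat, u < d → k + u < (s.length : Int) ∧
          PySem.List.pyGetD s (k + u) ' ' = PySem.List.pyGetD s (k + u - i) ' ') := by
  intro d
  induction d with
  | zero =>
      intro k hk
      simp [streakB_nonneg]
  | succ d ih =>
      intro k hk
      rw [show streakB s i k = if h : i ≤ k ∧ k < (s.length : Int) then
          (if PySem.List.pyGetD s k ' ' = PySem.List.pyGetD s (k - i) ' ' then
            streakB s i (k + 1) + 1 else 0) else 0 from by rw [streakB]]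
      by_cases hg : i ≤ k ∧ k < (s.length : Int)
      · rw [dif_pos hg]
        by_cases he : PySem.List.pyGetD s k ' ' = PySem.List.pyGetD s (k - i) ' '
        · rw [if_pos he]
          have hstep : (((d + 1 : Nat) : Int) ≤ streakB s i (k + 1) + 1)
              ↔ ((d : Int) ≤ streakB s i (k + 1)) := by push_cast; omega
          rw [hstep, ih (k + 1) (by omega)]
          constructor
          · intro h u hu
            cases u with
            | zero => simpa using ⟨hg.2, he⟩
            | succ u =>
                have h2 := h u (by omega)
                refine ⟨by push_cast at h2 ⊢; omega, ?_⟩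
                have e1 : k + ((u + 1 : Nat) : Int) = (k + 1) + (u : Int) := by push_cast; ring
                rw [e1]
                exact h2.2
          · intro h u hu
            have h2 := h (u + 1) (by omega)
            have e1 : k + ((u + 1 : Nat) : Int) = (k + 1) + (u : Int) := by push_cast; ring
            rw [e1] at h2
            exact h2
        · rw [if_neg he]
          constructor
          · intro h; exfalso; push_cast at h; omega
          · intro h; exact absurd (by simpa using (h 0 (by omega)).2) he
      · rw [dif_neg hg]
        constructor
        · intro h; exfalso; push_cast at h; omega
        · intro h
          exfalso
          have h1 := (h 0 (by omega)).1
          simp only [Nat.cast_zero, add_zero] at h1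
          exact hg ⟨hk, h1⟩

theorem chunk_len (s : List Char) (a i : Int) (h0 : 0 ≤ a) (hi : 0 ≤ i)
    (ha : a ≤ (s.length : Int)) :
    ((PySem.List.slice s (some a) (some (a + i))).length : Int)
      = min i ((s.length : Int) - a) := by
  rw [PySem.List.slice_toNat s h0 (by omega)]
  simp only [List.length_take, List.length_drop]
  omega

theorem chunk_eq_iff (s : List Char) (i p : Int) (hi : 1 ≤ i) (hp : i ≤ p)
    (hpn : p + i ≤ (s.length : Int)) :
    (PySem.List.slice s (some p) (some (p + i)) = PySem.List.slice s (some (p - i)) (some p))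
      ↔ i ≤ streakB s i p := by
  have hcast : (i : Int) = ((i.toNat : Nat) : Int) := by omega
  rw [show (i ≤ streakB s i p) ↔ (((i.toNat : Nat) : Int) ≤ streakB s i p) from by
        rw [← hcast],
    streak_ge_iff s i i.toNat p hp]
  rw [PySem.List.slice_toNat s (by omega) (by omega),
    PySem.List.slice_toNat s (by omega) (by omega)]
  have e1 : (p + i).toNat - p.toNat = i.toNat := by omega
  have e2 : p.toNat - (p - i).toNat = i.toNat := by omega
  rw [e1, e2]
  have hl1 : ((s.drop p.toNat).take i.toNat).length = i.toNat := by
    simp only [List.length_take, List.length_drop]; omega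
  have hl2 : ((s.drop (p - i).toNat).take i.toNat).length = i.toNat := by
    simp only [List.length_take, List.length_drop]; omega
  constructor
  · intro h u hu
    refine ⟨by omega, ?_⟩
    have := congrArg (fun l => l[u]?) h
    simp only [List.getElem?_take, List.getElem?_drop] at this
    rw [if_pos hu, if_pos hu] at this
    rw [PySem.List.pyGetD_eq_getElem s ' ' (by omega) (by omega),
      PySem.List.pyGetD_eq_getElem s ' ' (by omega) (by omega)]
    have g1 : s[p.toNat + u]? = some s[(p + (u:Int)).toNat] := by
      rw [List.getElem?_eq_getElem (by omega)]
      congr 1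
      congr 1
      omega
    have g2 : s[(p - i).toNat + u]? = some s[(p + (u:Int) - i).toNat] := by
      rw [List.getElem?_eq_getElem (by omega)]
      congr 1
      congr 1
      omega
    rw [g1, g2] at this
    exact Option.some.inj this
  · intro h
    apply List.ext_getElem (by rw [hl1, hl2])
    intro u hu1 hu2
    rw [hl1] at hu1
    have h2 := (h u hu1).2
    rw [PySem.List.pyGetD_eq_getElem s ' ' (by omega) (by omega),
      PySem.List.pyGetD_eq_getElem s ' ' (by omega) (by omega)] at h2
    rw [List.getElem_take, List.getElem_drop, List.getElem_take, List.getElem_drop]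
    convert h2 using 2
    · omega
    · omega

theorem bfold (s : List Char) (i : Int) (hi : 1 ≤ i) :
    ∀ (fuel : Nat) (p total run start : Int),
      (((s.length : Int) - p).toNat ≤ fuel) →
      i ≤ p → p - i < (s.length : Int) → p = start + run * i → 1 ≤ run → 0 ≤ start →
      PySem.List.slice s (some (p - i)) (some p)
        = PySem.List.slice s (some start) (some (start + i)) →
      ((((PySem.List.pyRange p (s.length : Int) i).foldl (stepB s i) (total, run, start)).1
        + (if ((PySem.List.pyRange p (s.length : Int) i).foldl (stepB s i) (total, run, start)).2.1 = 1
            then (s.length : Int) - ((PySem.List.pyRange p (s.length : Int) i).foldl (stepB s i) (total, run, start)).2.2 else i)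
        + (if 1 < ((PySem.List.pyRange p (s.length : Int) i).foldl (stepB s i) (total, run, start)).2.1
            then ((PySem.Int.toChars ((PySem.List.pyRange p (s.length : Int) i).foldl (stepB s i) (total, run, start)).2.1).length : Int) else 0))
      = total
        + (if 1 < run + (((chunksFrom s i p).takeWhile
              (· == PySem.List.slice s (some start) (some (start + i)))).length : Int)
           then ((PySem.Int.toChars (run + (((chunksFrom s i p).takeWhile
              (· == PySem.List.slice s (some start) (some (start + i)))).length : Int))).length : Int)
           else 0)
        + ((PySem.List.slice s (some start) (some (start + i))).length : Int)
        + runSum ((chunksFrom s i p).dropWhile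
            (· == PySem.List.slice s (some start) (some (start + i))))) := by
  have base : ∀ (p total run start : Int),
      (s.length : Int) ≤ p → i ≤ p → p - i < (s.length : Int) →
      p = start + run * i → 1 ≤ run → 0 ≤ start →
      ((((PySem.List.pyRange p (s.length : Int) i).foldl (stepB s i) (total, run, start)).1
        + (if ((PySem.List.pyRange p (s.length : Int) i).foldl (stepB s i) (total, run, start)).2.1 = 1
            then (s.length : Int) - ((PySem.List.pyRange p (s.length : Int) i).foldl (stepB s i) (total, run, start)).2.2 else i)
        + (if 1 < ((PySem.List.pyRange p (s.length : Int) i).foldl (stepB s i) (total, run, start)).2.1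
            then ((PySem.Int.toChars ((PySem.List.pyRange p (s.length : Int) i).foldl (stepB s i) (total, run, start)).2.1).length : Int) else 0))
      = total
        + (if 1 < run + (((chunksFrom s i p).takeWhile
              (· == PySem.List.slice s (some start) (some (start + i)))).length : Int)
           then ((PySem.Int.toChars (run + (((chunksFrom s i p).takeWhile
              (· == PySem.List.slice s (some start) (some (start + i)))).length : Int))).length : Int)
           else 0)
        + ((PySem.List.slice s (some start) (some (start + i))).length : Int)
        + runSum ((chunksFrom s i p).dropWhile
            (· == PySem.List.slice s (some start) (some (start + i))))) := by
    intro p total run start hnp hip hpi hpr hr hs0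
    have hnil : PySem.List.pyRange p (s.length : Int) i = [] :=
      pyRangeStep_nil p _ i (by omega) hnp
    rw [chunksFrom, hnil]
    simp only [List.foldl_nil, List.map_nil, List.takeWhile_nil, List.dropWhile_nil,
      List.length_nil, Nat.cast_zero, add_zero]
    rw [show runSum [] = 0 from by rw [runSum]]
    have hwl : ((PySem.List.slice s (some start) (some (start + i))).length : Int)
        = min i ((s.length : Int) - start) :=
      chunk_len s start i hs0 (by omega) (by nlinarith [hpr, hr, hi])
    by_cases h1 : run = 1
    · subst h1
      rw [if_pos rfl, if_neg (by omega)]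
      have h2 : start = p - i := by omega
      rw [hwl, min_eq_right (by omega)]
      ring
    · rw [if_neg h1, if_pos (by omega)]
      have hr2 : 2 ≤ run := by omega
      have hmul : 2 * i ≤ run * i := by nlinarith
      rw [hwl, min_eq_left (by omega)]
      ring
  intro fuel
  induction fuel with
  | zero =>
      intro p total run start hf hip hpi hpr hr hs0 hprev
      exact base p total run start (by omega) hip hpi hpr hr hs0
  | succ fuel ih =>
      intro p total run start hf hip hpi hpr hr hs0 hprev
      by_cases hpn : p < (s.length : Int)
      · have hcons := pyRangeStep_cons p (s.length : Int) i (by omega) hpn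
        have hchf : chunksFrom s i p
            = PySem.List.slice s (some p) (some (p + i)) :: chunksFrom s i (p + i) := by
          rw [chunksFrom, hcons, List.map_cons]
          rfl
        have hwlow : start + i ≤ p := by nlinarith [hpr, hr, hi]
        have hwl : ((PySem.List.slice s (some start) (some (start + i))).length : Int) = i := by
          rw [chunk_len s start i hs0 (by omega) (by omega)]
          omega
        have key : (PySem.List.slice s (some p) (some (p + i))
              = PySem.List.slice s (some start) (some (start + i)))
            ↔ (p + i ≤ (s.length : Int) ∧ i ≤ streakB s i p) := by
          constructor
          · intro he
            have hlc := chunk_len s p i (by omega) (by omega) (by omega)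
            rw [he, hwl] at hlc
            have hple : p + i ≤ (s.length : Int) := by omega
            refine ⟨hple, ?_⟩
            rw [← chunk_eq_iff s i p hi hip hple]
            exact he.trans hprev.symm
          · intro hc
            exact ((chunk_eq_iff s i p hi hip hc.1).mpr hc.2).trans hprev
        rw [hcons, List.foldl_cons, hchf]
        by_cases hc : p + i ≤ (s.length : Int) ∧ i ≤ streakB s i p
        · have heq : PySem.List.slice s (some p) (some (p + i))
              = PySem.List.slice s (some start) (some (start + i)) := key.mpr hc
          rw [show stepB s i (total, run, start) p = (total, run + 1, start) from by
            simp only [stepB]; rw [if_pos hc]]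
          rw [ih (p + i) total (run + 1) start (by omega) (by omega)
            (by rw [show p + i - i = p by ring]; omega)
            (by rw [add_mul, one_mul]; omega) (by omega) hs0
            (by rw [show p + i - i = p by ring]; exact heq)]
          have hbeq : (PySem.List.slice s (some p) (some (p + i))
              == PySem.List.slice s (some start) (some (start + i))) = true :=
            beq_iff_eq.mpr heq
          rw [show List.takeWhile (· == PySem.List.slice s (some start) (some (start + i)))
                (PySem.List.slice s (some p) (some (p + i)) :: chunksFrom s i (p + i))
              = PySem.List.slice s (some p) (some (p + i))
                :: List.takeWhile (· == PySem.List.slice s (some start) (some (start + i)))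
                  (chunksFrom s i (p + i)) from by
            rw [List.takeWhile_cons, hbeq]; simp]
          rw [show List.dropWhile (· == PySem.List.slice s (some start) (some (start + i)))
                (PySem.List.slice s (some p) (some (p + i)) :: chunksFrom s i (p + i))
              = List.dropWhile (· == PySem.List.slice s (some start) (some (start + i)))
                  (chunksFrom s i (p + i)) from by
            rw [List.dropWhile_cons, hbeq]; simp]
          have harg : run + 1 + (((chunksFrom s i (p + i)).takeWhile
                (· == PySem.List.slice s (some start) (some (start + i)))).length : Int)
              = run + (((PySem.List.slice s (some p) (some (p + i))
                  :: List.takeWhile (· == PySem.List.slice s (some start) (some (start + i)))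
                    (chunksFrom s i (p + i))).length : Int)) := by
            simp only [List.length_cons]
            push_cast
            ring
          rw [harg]
        · have hne : PySem.List.slice s (some p) (some (p + i))
              ≠ PySem.List.slice s (some start) (some (start + i)) :=
            fun he => hc (key.mp he)
          rw [show stepB s i (total, run, start) p
              = (total + i + (if 1 < run then ((PySem.Int.toChars run).length : Int) else 0),
                  1, p) from by
            simp only [stepB]; rw [if_neg hc]]
          rw [ih (p + i)
            (total + i + (if 1 < run then ((PySem.Int.toChars run).length : Int) else 0)) 1 p
            (by omega) (by omega) (by rw [show p + i - i = p by ring]; omega)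
            (by ring) (le_refl 1) (by omega)
            (by rw [show p + i - i = p by ring])]
          have hbeq : (PySem.List.slice s (some p) (some (p + i))
              == PySem.List.slice s (some start) (some (start + i))) = false :=
            beq_eq_false_iff_ne.mpr hne
          rw [show List.takeWhile (· == PySem.List.slice s (some start) (some (start + i)))
                (PySem.List.slice s (some p) (some (p + i)) :: chunksFrom s i (p + i))
              = [] from by rw [List.takeWhile_cons, hbeq]; simp]
          rw [show List.dropWhile (· == PySem.List.slice s (some start) (some (start + i)))
                (PySem.List.slice s (some p) (some (p + i)) :: chunksFrom s i (p + i))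
              = PySem.List.slice s (some p) (some (p + i)) :: chunksFrom s i (p + i) from by
            rw [List.dropWhile_cons, hbeq]; simp]
          rw [show runSum (PySem.List.slice s (some p) (some (p + i)) :: chunksFrom s i (p + i))
              = PySem.List.len (PySem.List.slice s (some p) (some (p + i)))
                + (if 1 < 1 + (((chunksFrom s i (p + i)).takeWhile
                      (· == PySem.List.slice s (some p) (some (p + i)))).length : Int)
                   then (PySem.List.len (PySem.Int.toChars (1 + (((chunksFrom s i (p + i)).takeWhile
                      (· == PySem.List.slice s (some p) (some (p + i)))).length : Int)))) else 0)
                + runSum ((chunksFrom s i (p + i)).dropWhile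
                    (· == PySem.List.slice s (some p) (some (p + i)))) from by rw [runSum]]
          simp only [PySem.List.len_eq, List.length_nil, Nat.cast_zero, add_zero, hwl]
          ring
      · exact base p total run start (by omega) hip hpi hpr hr hs0

theorem bper_eq_runSum (s : List Char) (i : Int) (hi : 1 ≤ i)
    (h2 : 2 * i ≤ (s.length : Int)) :
    (((PySem.List.pyRange i (s.length : Int) i).foldl (stepB s i) (0, 1, 0)).1
      + (if ((PySem.List.pyRange i (s.length : Int) i).foldl (stepB s i) (0, 1, 0)).2.1 = 1
          then (s.length : Int) - ((PySem.List.pyRange i (s.length : Int) i).foldl (stepB s i) (0, 1, 0)).2.2 else i)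
      + (if 1 < ((PySem.List.pyRange i (s.length : Int) i).foldl (stepB s i) (0, 1, 0)).2.1
          then ((PySem.Int.toChars ((PySem.List.pyRange i (s.length : Int) i).foldl (stepB s i) (0, 1, 0)).2.1).length : Int) else 0))
    = runSum (chunksOf s i) := by
  have hb := bfold s i hi ((s.length : Int) - i).toNat i 0 1 0 (le_refl _) (le_refl _)
    (by omega) (by ring) (le_refl _) (le_refl _)
    (by norm_num)
  rw [hb]
  have hco : chunksOf s i
      = PySem.List.slice s (some 0) (some (0 + i)) :: chunksFrom s i i := by
    rw [chunksOf, PySem.List.len_eq, pyRangeStep_cons 0 (s.length : Int) i (by omega) (by omega),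
      List.map_cons, chunksFrom, zero_add]
  rw [hco]
  rw [show runSum (PySem.List.slice s (some 0) (some (0 + i)) :: chunksFrom s i i)
      = PySem.List.len (PySem.List.slice s (some 0) (some (0 + i)))
        + (if 1 < 1 + (((chunksFrom s i i).takeWhile
              (· == PySem.List.slice s (some 0) (some (0 + i)))).length : Int)
           then (PySem.List.len (PySem.Int.toChars (1 + (((chunksFrom s i i).takeWhile
              (· == PySem.List.slice s (some 0) (some (0 + i)))).length : Int)))) else 0)
        + runSum ((chunksFrom s i i).dropWhile
            (· == PySem.List.slice s (some 0) (some (0 + i)))) from by rw [runSum]]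
  simp only [PySem.List.len_eq]
  ring

theorem foldl_stepL_length (l : List (List Char)) : ∀ (b : List Char) (cnt : Int) (w : List Char),
    (∀ x ∈ l, x ≠ []) → w ≠ [] → 1 ≤ cnt →
    ((((l ++ [[]]).foldl stepL (b, cnt, w)).1.length : Int))
      = b.length
        + (if 1 < cnt + ((l.takeWhile (· == w)).length : Int)
            then ((PySem.Int.toChars (cnt + ((l.takeWhile (· == w)).length : Int))).length : Int) else 0)
        + w.length + runSum (l.dropWhile (· == w)) := by
  induction l with
  | nil =>
      intro b cnt w _ hw hc
      simp only [List.nil_append, List.foldl_cons, List.foldl_nil, stepL, List.takeWhile_nil,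
        List.dropWhile_nil, runSum, List.length_nil, Nat.cast_zero, add_zero]
      rw [if_neg hw]
      by_cases h1 : cnt = 1
      · subst h1
        rw [if_neg (by simp), if_neg (by omega)]
        push_cast [List.length_append]; ring
      · rw [if_pos h1, if_pos (by omega)]
        push_cast [List.length_append]; ring
  | cons x l ih =>
      intro b cnt w hne hw hc
      by_cases hx : w = x
      · subst hx
        rw [List.cons_append, List.foldl_cons,
          show stepL (b, cnt, w) w = (b, cnt + 1, w) from by simp [stepL]]
        rw [ih b (cnt+1) w (fun y hy => hne y (List.mem_cons_of_mem _ hy)) hw (by omega)]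
        have harg : cnt + ((List.takeWhile (· == w) (w :: l)).length : Int)
            = (cnt + 1) + ((List.takeWhile (· == w) l).length : Int) := by
          simp; ring
        rw [harg, show List.dropWhile (· == w) (w :: l) = List.dropWhile (· == w) l from by
          simp]
      · have hx' : (x == w) = false := beq_eq_false_iff_ne.mpr (fun h => hx h.symm)
        rw [List.cons_append, List.foldl_cons,
          show stepL (b, cnt, w) x
              = ((if cnt ≠ 1 then b ++ PySem.Int.toChars cnt ++ w else b ++ w), 1, x) from by
            rw [stepL, if_neg (fun h => hx h)]]
        have hxne : x ≠ [] := hne x List.mem_cons_self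
        rw [ih _ 1 x (fun y hy => hne y (List.mem_cons_of_mem _ hy)) hxne (by omega)]
        rw [show List.takeWhile (· == w) (x :: l) = [] from by simp [hx'],
          show List.dropWhile (· == w) (x :: l) = x :: l from by simp [hx'],
          show runSum (x :: l) = PySem.List.len x
              + (if 1 < 1 + ((l.takeWhile (· == x)).length : Int)
                  then (PySem.List.len (PySem.Int.toChars (1 + ((l.takeWhile (· == x)).length : Int)))) else 0)
              + runSum (l.dropWhile (· == x)) from by rw [runSum]]
        simp only [PySem.List.len_eq, List.length_nil, Nat.cast_zero, add_zero]
        by_cases h1 : cnt = 1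
        · subst h1
          rw [if_neg (by simp), if_neg (show ¬ (1:Int) < 1 by omega)]
          push_cast [List.length_append]; ring
        · rw [if_pos h1, if_pos (show (1:Int) < cnt by omega)]
          push_cast [List.length_append]; ring

theorem slice_ne_nil (s : List Char) {k i : Int} (h0 : 0 ≤ k) (hk : k < (s.length : Int))
    (hi : 1 ≤ i) : PySem.List.slice s (some k) (some (k + i)) ≠ [] := by
  rw [PySem.List.slice_toNat s h0 (by omega)]
  intro hemp
  have h1 := congrArg List.length hemp
  simp [List.length_take, List.length_drop] at h1
  omega

theorem slice_nil_of_ge (s : List Char) {a b : Int} (h0 : 0 ≤ a) (hb : 0 ≤ b)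
    (h : (s.length : Int) ≤ a) : PySem.List.slice s (some a) (some b) = [] := by
  rw [PySem.List.slice_toNat s h0 hb]
  rw [List.drop_eq_nil_of_le (by omega), List.take_nil]

-- chunk list in closed form
theorem chunksOf_eq (s : List Char) (i : Int) (hi : 1 ≤ i) (hn : s ≠ []) :
    chunksOf s i = (List.range (((s.length : Int) + i - 1) / i).toNat).map
      (fun k : Nat => PySem.List.slice s (some (i * (k : Int))) (some (i * (k : Int) + i))) := by
  have hlen : 0 < (s.length : Int) := by
    have := List.length_pos_iff.mpr hn; exact_mod_cast this
  rw [chunksOf, PySem.List.len_eq, PySem.List.pyRange_of_pos 0 ((s.length : Int)) (by omega),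
    if_pos (by omega), List.map_map]
  simp only [sub_zero, zero_add]
  apply List.map_congr_left
  intro k _
  rfl

-- A's inner index list, mapped to slices, is the chunk tail plus the empty sentinel
theorem arange_map_eq (s : List Char) (i : Int) (hi : 1 ≤ i) (hn : s ≠ []) :
    (PySem.List.pyRange i ((s.length : Int) + i) i).map
        (fun j => PySem.List.slice s (some j) (some (j + i)))
      = (chunksOf s i).tail ++ [[]] := by
  have hlen : 0 < (s.length : Int) := by
    have := List.length_pos_iff.mpr hn; exact_mod_cast this
  have hM1 : 1 ≤ ((s.length : Int) + i - 1) / i := by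
    rw [Int.le_ediv_iff_mul_le (by omega)]; omega
  obtain ⟨mm, hmm⟩ : ∃ mm, (((s.length : Int) + i - 1) / i).toNat = mm + 1 :=
    ⟨(((s.length : Int) + i - 1) / i).toNat - 1, by omega⟩
  have hM : ((s.length : Int) + i - 1) / i = ((mm : Int) + 1) := by omega
  have hub : (s.length : Int) + i - 1 < (((s.length : Int) + i - 1) / i + 1) * i :=
    Int.lt_ediv_add_one_mul_self _ (by omega)
  have hn_le : (s.length : Int) ≤ i + i * mm := by nlinarith [hub, hM]
  rw [chunksOf_eq s i hi hn, hmm]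
  rw [PySem.List.pyRange_of_pos i ((s.length : Int) + i) (by omega), if_pos (by omega)]
  have harg : (((s.length : Int) + i - i + i - 1) / i).toNat = mm + 1 := by
    rw [show (s.length : Int) + i - i + i - 1 = (s.length : Int) + i - 1 by ring, hmm]
  rw [harg]
  conv_lhs => rw [List.range_succ]
  conv_rhs => rw [List.range_succ_eq_map]
  simp only [List.map_append, List.map_cons, List.map_nil, List.map_map, List.tail_cons]
  congr 1
  · apply List.map_congr_left
    intro k _
    simp only [Function.comp_apply]
    have h1 : i + i * (k : Int) = i * ((k : Int) + 1) := by ring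
    have h2 : (↑(Nat.succ k) : Int) = (k : Int) + 1 := by push_cast; ring
    rw [h1, h2]
  · congr 1
    apply slice_nil_of_ge s (by nlinarith) (by nlinarith) hn_le

theorem chunksOf_mem_ne_nil (s : List Char) (i : Int) (hi : 1 ≤ i) (hn : s ≠ [])
    {c : List Char} (hc : c ∈ chunksOf s i) : c ≠ [] := by
  have hlen : 0 < (s.length : Int) := by
    have := List.length_pos_iff.mpr hn; exact_mod_cast this
  rw [chunksOf_eq s i hi hn, List.mem_map] at hc
  obtain ⟨k, hk, rfl⟩ := hc
  rw [List.mem_range] at hk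
  have hub : (s.length : Int) + i - 1 < (((s.length : Int) + i - 1) / i + 1) * i :=
    Int.lt_ediv_add_one_mul_self _ (by omega)
  have hkM : (k : Int) < ((s.length : Int) + i - 1) / i := by
    have := hk; omega
  have hlb : (((s.length : Int) + i - 1) / i) * i ≤ (s.length : Int) + i - 1 :=
    Int.ediv_mul_le _ (by omega)
  have hklt : i * (k : Int) < (s.length : Int) := by nlinarith [hkM, hlb, hi]
  exact slice_ne_nil s (by nlinarith) hklt hi

theorem perUnit (s : List Char) (i : Int) (hi : 1 ≤ i) (hn : s ≠ []) :
    ((((PySem.List.pyRange i ((s.length : Int) + i) i).foldl (stepA s i)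
        ([], 1, PySem.List.slice s none (some i))).1.length : Int))
      = runSum (chunksOf s i) := by
  have hlen : 0 < (s.length : Int) := by
    have := List.length_pos_iff.mpr hn; exact_mod_cast this
  obtain ⟨c0, tl, hct⟩ : ∃ c0 tl, chunksOf s i = c0 :: tl := by
    rw [chunksOf_eq s i hi hn]
    have hM1 : 1 ≤ ((s.length : Int) + i - 1) / i := by
      rw [Int.le_ediv_iff_mul_le (by omega)]; omega
    obtain ⟨mm, hmm⟩ : ∃ mm, (((s.length : Int) + i - 1) / i).toNat = mm + 1 :=
      ⟨(((s.length : Int) + i - 1) / i).toNat - 1, by omega⟩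
    rw [hmm, List.range_succ_eq_map]
    exact ⟨_, _, rfl⟩
  have hc0 : PySem.List.slice s none (some i) = c0 := by
    have := chunksOf_eq s i hi hn
    rw [hct] at this
    have hM1 : 1 ≤ ((s.length : Int) + i - 1) / i := by
      rw [Int.le_ediv_iff_mul_le (by omega)]; omega
    obtain ⟨mm, hmm⟩ : ∃ mm, (((s.length : Int) + i - 1) / i).toNat = mm + 1 :=
      ⟨(((s.length : Int) + i - 1) / i).toNat - 1, by omega⟩
    rw [hmm, List.range_succ_eq_map, List.map_cons] at this
    have h0 := (List.cons.injEq _ _ _ _).mp this |>.1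
    rw [h0]
    simp
  have hfold : (PySem.List.pyRange i ((s.length : Int) + i) i).foldl (stepA s i)
        ([], 1, PySem.List.slice s none (some i))
      = ((chunksOf s i).tail ++ [[]]).foldl stepL ([], 1, c0) := by
    rw [← arange_map_eq s i hi hn, List.foldl_map, hc0]
    rfl
  rw [hfold, hct, List.tail_cons]
  have hc0ne : c0 ≠ [] := chunksOf_mem_ne_nil s i hi hn (by rw [hct]; exact List.mem_cons_self)
  have htlne : ∀ x ∈ tl, x ≠ [] := fun x hx =>
    chunksOf_mem_ne_nil s i hi hn (by rw [hct]; exact List.mem_cons_of_mem _ hx)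
  rw [foldl_stepL_length tl [] 1 c0 htlne hc0ne (by omega)]
  rw [show runSum (c0 :: tl) = PySem.List.len c0
        + (if 1 < 1 + ((tl.takeWhile (· == c0)).length : Int)
            then (PySem.List.len (PySem.Int.toChars (1 + ((tl.takeWhile (· == c0)).length : Int)))) else 0)
        + runSum (tl.dropWhile (· == c0)) from by rw [runSum]]
  simp only [PySem.List.len_eq, List.length_nil, Nat.cast_zero]
  ring

theorem runSum_big (s : List Char) (i : Int) (hi : 1 ≤ i) (hn : s ≠ [])
    (hbig : (s.length : Int) < 2 * i) : runSum (chunksOf s i) = (s.length : Int) := by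
  have hlen : 0 < (s.length : Int) := by
    have := List.length_pos_iff.mpr hn; exact_mod_cast this
  rw [chunksOf_eq s i hi hn]
  by_cases hcase : (s.length : Int) ≤ i
  · have hM : ((s.length : Int) + i - 1) / i = 1 := by
      have h := PySem.Int.floordiv_eq_iff_of_pos (a := (s.length : Int) + i - 1) (b := i)
        (q := 1) (by omega)
      rw [PySem.Int.floordiv_eq_ediv_of_pos (by omega)] at h
      rw [h]; constructor <;> nlinarith
    rw [hM]
    simp only [Int.toNat_one, List.range_one, List.map_cons, List.map_nil]
    have hc : PySem.List.slice s (some (i * ((0:Nat) : Int))) (some (i * ((0:Nat) : Int) + i)) = s := by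
      rw [show (i * ((0:Nat) : Int)) = (0:Int) by push_cast; ring]
      rw [PySem.List.slice_toNat s (by omega) (by omega)]
      simp only [Int.toNat_zero, List.drop_zero, Nat.sub_zero, zero_add]
      exact List.take_of_length_le (by omega)
    rw [hc, runSum]
    simp [runSum]
  · have hM : ((s.length : Int) + i - 1) / i = 2 := by
      have h := PySem.Int.floordiv_eq_iff_of_pos (a := (s.length : Int) + i - 1) (b := i)
        (q := 2) (by omega)
      rw [PySem.Int.floordiv_eq_ediv_of_pos (by omega)] at h
      rw [h]; constructor <;> nlinarith
    rw [hM]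
    rw [show ((2:Int)).toNat = 2 from rfl, show List.range 2 = [0, 1] from rfl]
    simp only [List.map_cons, List.map_nil, Nat.cast_zero, Nat.cast_one, mul_zero, mul_one,
      zero_add]
    have hc0 : (PySem.List.slice s (some (0:Int)) (some i)).length = i.toNat := by
      rw [PySem.List.slice_toNat s (by omega) (by omega)]
      simp only [Int.toNat_zero, List.drop_zero, Nat.sub_zero, List.length_take]
      omega
    have hc1 : (PySem.List.slice s (some i) (some (i + i))).length = s.length - i.toNat := by
      rw [PySem.List.slice_toNat s (by omega) (by omega)]
      simp only [List.length_take, List.length_drop]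
      omega
    have hne : ((PySem.List.slice s (some i) (some (i + i)))
        == (PySem.List.slice s (some (0:Int)) (some i))) = false := by
      rw [beq_eq_false_iff_ne]
      intro h
      have := congrArg List.length h
      rw [hc0, hc1] at this
      omega
    rw [runSum]
    simp only [List.takeWhile_cons, hne, Bool.false_eq_true, if_false, List.takeWhile_nil,
      List.dropWhile_cons, List.dropWhile_nil, List.length_nil, Nat.cast_zero, add_zero,
      PySem.List.len_eq]
    rw [if_neg (by omega), runSum]
    simp only [List.takeWhile_nil, List.dropWhile_nil, List.length_nil, Nat.cast_zero, add_zero,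
      PySem.List.len_eq, runSum]
    rw [if_neg (by omega)]
    rw [hc0, hc1]
    omega

theorem foldl_min_le (f : Int → Int) (l : List Int) : ∀ a : Int,
    l.foldl (fun acc x => min acc (f x)) a ≤ a := by
  induction l with
  | nil => intro a; simp
  | cons x l ih =>
      intro a
      exact le_trans (ih _) (min_le_left _ _)

theorem foldl_min_const (f : Int → Int) (n : Int) (l : List Int) (h : ∀ x ∈ l, f x = n) :
    ∀ a : Int, a ≤ n → l.foldl (fun acc x => min acc (f x)) a = a := by
  induction l with
  | nil => intro a _; rfl
  | cons x l ih =>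
      intro a ha
      simp only [List.foldl_cons]
      rw [h x List.mem_cons_self, min_eq_left ha]
      exact ih (fun y hy => h y (List.mem_cons_of_mem _ hy)) a ha

theorem solution_eq (string : String) : solution string = solution_alt string := by
  unfold solution solution_alt
  simp only [PySem.List.len_eq]
  set s := string.toList with hs
  rcases Nat.lt_or_ge s.length 2 with hlt | hge
  · interval_cases h : s.length
    · rw [if_neg (by norm_num), show ((0:Nat):Int) = 0 from rfl]
      norm_num [PySem.List.pyRange_one_eq_nil, PySem.Int.floordiv]
    · rw [if_pos (by norm_num), show ((1:Nat):Int) = 1 from rfl]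
      rw [show PySem.Int.floordiv 1 2 = 0 from rfl]
      norm_num [PySem.List.pyRange_one_eq_nil]
  · have hn : s ≠ [] := by intro h; rw [h] at hge; simp at hge
    rw [if_neg (by exact_mod_cast (by omega : ¬ (s.length : Int) = 1))]
    rw [PySem.List.foldl_congr_mem _ _ (fun answer i => min answer (runSum (chunksOf s i))) _
      (by
        intro acc i hi
        rw [PySem.List.mem_pyRange_one] at hi
        simp only []
        congr 1
        exact_mod_cast perUnit s i (by omega) hn)]
    rw [show PySem.Int.floordiv ((s.length : Nat) : Int) 2 = (s.length : Int) / 2 from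
      PySem.Int.floordiv_eq_ediv_of_pos (by omega)]
    rw [PySem.List.foldl_congr_mem _
      (fun best i => min best
        ((((PySem.List.pyRange i ((s.length : Int)) i).foldl (stepB s i) (0, 1, 0)).1
          + (if ((PySem.List.pyRange i ((s.length : Int)) i).foldl (stepB s i) (0, 1, 0)).2.1 = 1
              then ((s.length : Int)) - ((PySem.List.pyRange i ((s.length : Int)) i).foldl (stepB s i) (0, 1, 0)).2.2 else i)
          + (if 1 < ((PySem.List.pyRange i ((s.length : Int)) i).foldl (stepB s i) (0, 1, 0)).2.1
              then ((PySem.Int.toChars ((PySem.List.pyRange i ((s.length : Int)) i).foldl (stepB s i) (0, 1, 0)).2.1).length : Int) else 0))))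
      (fun best i => min best (runSum (chunksOf s i))) _
      (by
        intro acc i hi
        rw [PySem.List.mem_pyRange_one] at hi
        simp only []
        congr 1
        exact bper_eq_runSum s i (by omega) (by omega))]
    rw [PySem.List.pyRange_one_append 1 ((s.length : Int) / 2 + 1) ((s.length : Int) + 1)
      (by omega) (by omega), List.foldl_append]
    exact foldl_min_const _ _ _
      (by
        intro i hi
        rw [PySem.List.mem_pyRange_one] at hi
        exact runSum_big s i (by omega) hn (by omega))
      _ (foldl_min_le _ _ _)

-- ===== VERDICT (by name: the statement is the Claim_ definition above) =====
theorem solution_spec : Claim_equal_solution := by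
  intro string _
  unfold Spec_solution
  exact solution_eq string
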